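-- pv_equiv track=rewrite | github.com/pmjoniak/popy | c9/p4.py | brakuje
-- ===== SOURCE A (Python) =====
-- def litery(wyraz):
-- 	wynik = {}
-- 	for c in wyraz:
-- 		if c not in wynik:
-- 			wynik[c] = 1
-- 		else:
-- 			wynik[c] += 1
-- 	return wynik
--
-- def brakuje(jest, ma_byc):
-- 	res = ''
-- 	l1 = litery(jest)
-- 	l2 = litery(ma_byc)
-- 	for e in l2:
-- 		if e not in l1:
-- 			res = res + l2[e] * e
-- 		else:
-- 			res = res + (l2[e] - l1[e]) * e
-- 	return res
-- ===== SOURCE B (Python) =====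
-- def brakuje(jest, ma_byc):
--     def go(zrodlo, cel):
--         if not cel:
--             return ''
--         c = cel[0]
--         cel2 = [x for x in cel if x != c]
--         zrodlo2 = [x for x in zrodlo if x != c]
--         need = (len(cel) - len(cel2)) - (len(zrodlo) - len(zrodlo2))
--         return c * need + go(zrodlo2, cel2)
--     return go(list(jest), list(ma_byc))
-- ===== Notes on version B (the rewrite author's own statement) =====
-- stated objective: alternative
-- what changed: B drops A's two count dictionaries and key loop entirely: it recurses on the structure of the target, at each step peeling the first remaining letter, computing its shortfall from the length drop caused by filtering that letter out of both strings, and recursing on the filtered remainders.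
import Mathlib
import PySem

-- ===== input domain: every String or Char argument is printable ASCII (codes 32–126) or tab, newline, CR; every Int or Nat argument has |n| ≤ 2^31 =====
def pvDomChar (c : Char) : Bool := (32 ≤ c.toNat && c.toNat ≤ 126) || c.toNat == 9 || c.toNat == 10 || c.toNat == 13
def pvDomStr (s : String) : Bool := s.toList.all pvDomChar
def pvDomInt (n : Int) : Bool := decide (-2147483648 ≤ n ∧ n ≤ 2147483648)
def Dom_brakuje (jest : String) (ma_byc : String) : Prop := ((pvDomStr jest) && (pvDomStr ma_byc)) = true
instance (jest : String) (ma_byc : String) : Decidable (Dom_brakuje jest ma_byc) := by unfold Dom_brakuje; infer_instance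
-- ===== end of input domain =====

-- B replaces A's two count dictionaries and key loop by structural recursion: peel the target's
-- first letter, emit its shortfall computed from length differences of filtered lists, recurse on
-- the filtered remainders (objective: alternative; same return value).


-- ===== PORT A =====
-- helper 'litery': counts each character; 'if c not in wynik: wynik[c] = 1 else: wynik[c] += 1'
def pvLitery (wyraz : List Char) : PySem.Dict Char Int :=
  wyraz.foldl (fun wynik c =>
    if wynik.contains c = false then wynik.insert c 1
    else wynik.modify c 0 (· + 1)) PySem.Dict.empty

-- strings are ported on the List Char side (PySem convention); res accumulates chars, wrapped at the end
def brakuje (jest : String) (ma_byc : String) : String :=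
  let l1 := pvLitery jest.toList
  let l2 := pvLitery ma_byc.toList
  let res := l2.keys.foldl (fun res e =>
    if l1.contains e = false then res ++ PySem.List.pyRepeat [e] (l2.getD e 0)
    else res ++ PySem.List.pyRepeat [e] (l2.getD e 0 - l1.getD e 0)) ([] : List Char)
  String.mk res

-- ===== PORT B =====
-- inner 'go': if cel is empty return ''; else c = cel[0], filter c out of both lists,
-- need = (dropped from cel) - (dropped from zrodlo), emit c * need, recurse on the remainders
def pvGo (zrodlo cel : List Char) : List Char :=
  match cel with
  | [] => []
  | c :: t =>
    let cel2 := (c :: t).filter (fun x => x != c)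
    let zrodlo2 := zrodlo.filter (fun x => x != c)
    let need : Int := (((c :: t).length : Int) - (cel2.length : Int)) - ((zrodlo.length : Int) - (zrodlo2.length : Int))
    PySem.List.pyRepeat [c] need ++ pvGo zrodlo2 cel2
termination_by cel.length
decreasing_by
  simp
  exact List.length_filter_le _ _

def brakuje_alt (jest : String) (ma_byc : String) : String :=
  String.mk (pvGo jest.toList ma_byc.toList)

-- ===== PRECONDITION & SPEC =====
def Spec_brakuje (jest : String) (ma_byc : String) (out : String) : Prop := out = brakuje_alt jest ma_byc
instance (jest : String) (ma_byc : String) (out : String) : Decidable (Spec_brakuje jest ma_byc out) := by unfold Spec_brakuje; infer_instance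

-- ===== CLAIM (what is proved, stated in full; the proofs are below) =====
def Claim_equal_brakuje : Prop := ∀ (jest : String) (ma_byc : String), Dom_brakuje jest ma_byc → Spec_brakuje jest ma_byc (brakuje jest ma_byc)

-- ===== LEMMAS AND PROOFS =====

lemma pvInsert_one_eq_modify (d : PySem.Dict Char Int) (c : Char) (h : d.contains c = false) :
    d.insert c 1 = d.modify c 0 (· + 1) := by
  simp [PySem.Dict.insert, PySem.Dict.modify, h, PySem.Dict.getD_of_not_contains d 0 h]

lemma pvLitery_eq_counter (w : List Char) : pvLitery w = PySem.Dict.counter w := by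
  unfold pvLitery
  rw [PySem.Dict.counter_eq_foldl]
  have hf : (fun (wynik : PySem.Dict Char Int) c =>
      if wynik.contains c = false then wynik.insert c 1 else wynik.modify c 0 (· + 1))
      = fun (d : PySem.Dict Char Int) c => d.modify c 0 (· + 1) := by
    funext d c
    by_cases h : d.contains c = false
    · simp [h, pvInsert_one_eq_modify d c h]
    · simp [h]
  rw [hf]

-- the per-letter contribution both programs produce
def pvG (zrodlo cel : List Char) (e : Char) : List Char :=
  List.replicate ((cel.count e : Int) - (zrodlo.count e : Int)).toNat e

lemma pvA_eq (jest ma_byc : String) :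
    brakuje jest ma_byc
      = String.mk ((PySem.Set.ofList ma_byc.toList).flatMap (pvG jest.toList ma_byc.toList)) := by
  unfold brakuje
  simp only [pvLitery_eq_counter, PySem.Dict.keys_counter]
  congr 1
  have hcong : ∀ e ∈ PySem.Set.ofList ma_byc.toList, ∀ acc : List Char,
      (if (PySem.Dict.counter jest.toList).contains e = false then
        acc ++ PySem.List.pyRepeat [e] ((PySem.Dict.counter ma_byc.toList).getD e 0)
      else acc ++ PySem.List.pyRepeat [e]
          ((PySem.Dict.counter ma_byc.toList).getD e 0 - (PySem.Dict.counter jest.toList).getD e 0))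
      = acc ++ pvG jest.toList ma_byc.toList e := by
    intro e _ acc
    by_cases h : (PySem.Dict.counter jest.toList).contains e = false
    · have hz : jest.toList.count e = 0 := by
        rw [PySem.Dict.contains_counter] at h
        exact List.count_eq_zero.mpr (by simpa using h)
      simp [h, PySem.Dict.getD_counter, PySem.List.pyRepeat_singleton, pvG, hz]
    · simp [h, PySem.Dict.getD_counter, PySem.List.pyRepeat_singleton, pvG]
  rw [PySem.List.foldl_congr_mem' _ _ (fun acc e => acc ++ pvG jest.toList ma_byc.toList e) _ hcong,
      PySem.List.foldl_append_eq_flatMap]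
  simp

-- dedup of first occurrences commutes with filtering a letter out
lemma pvOfList_filter (t : List Char) (c : Char) :
    PySem.Set.ofList (t.filter (fun x => x != c)) = PySem.Set.discard (PySem.Set.ofList t) c := by
  induction t with
  | nil => rfl
  | cons a t ih =>
    by_cases h : a = c
    · subst h
      simp [List.filter, PySem.Set.ofList_cons, PySem.Set.discard, ih, List.filter_filter]
    · rw [List.filter_cons_of_pos (by simp [h]), PySem.Set.ofList_cons, ih, PySem.Set.ofList_cons]
      simp only [PySem.Set.discard]
      rw [List.filter_cons_of_pos (by simp [h]), List.filter_filter, List.filter_filter]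
      congr 1
      apply List.filter_congr
      intro x _
      exact Bool.and_comm _ _

lemma pvCount_filter_ne (l : List Char) (c e : Char) (h : e ≠ c) :
    (l.filter (fun x => x != c)).count e = l.count e := by
  rw [List.count_filter]
  simp [h]

-- the length drop of filtering out c is the count of c
lemma pvLen_sub_filter (l : List Char) (c : Char) :
    (l.length : Int) - ((l.filter (fun x => x != c)).length : Int) = (l.count c : Int) := by
  have h1 := List.length_eq_countP_add_countP (fun x => x != c) (l := l)
  have h2 : (l.filter (fun x => x != c)).length = l.countP (fun x => x != c) :=
    Eq.symm List.countP_eq_length_filter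
  have h3 : l.countP (fun a => decide ¬((a != c) = true)) = l.count c := by
    rw [List.count]
    apply List.countP_congr
    intro a _
    by_cases ha : a = c <;> simp [ha, Ne.symm]
  omega

-- characterisation of B's recursion as the flatMap both programs reduce to
lemma pvGo_eq (cel zrodlo : List Char) :
    pvGo zrodlo cel = (PySem.Set.ofList cel).flatMap (pvG zrodlo cel) := by
  induction hn : cel.length using Nat.strong_induction_on generalizing cel zrodlo with
  | _ n ih =>
    match cel with
    | [] => rw [pvGo.eq_def]; rfl
    | c :: t =>
      rw [pvGo.eq_def]
      simp only
      have hfc : (c :: t).filter (fun x => x != c) = t.filter (fun x => x != c) := by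
        simp [List.filter]
      have hlen : ((c :: t).filter (fun x => x != c)).length < n := by
        rw [hfc]; subst hn
        exact Nat.lt_succ_of_le (List.length_filter_le _ _)
      rw [ih _ hlen _ _ rfl]
      rw [PySem.Set.ofList_cons, List.flatMap_cons]
      congr 1
      · rw [PySem.List.pyRepeat_singleton]
        unfold pvG
        congr 2
        rw [pvLen_sub_filter, pvLen_sub_filter]
      · rw [← pvOfList_filter, hfc]
        simp only [List.flatMap_def]
        refine congrArg List.flatten (List.map_congr_left ?_)
        intro e he
        have hec : e ≠ c := by
          have hm := (PySem.Set.mem_ofList _ _).mp he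
          have := List.of_mem_filter hm
          simpa using this
        unfold pvG
        rw [pvCount_filter_ne _ _ _ hec, pvCount_filter_ne _ _ _ hec]
        have hce : ¬ c = e := fun h => hec h.symm
        simp [hce]

lemma pvB_eq (jest ma_byc : String) :
    brakuje_alt jest ma_byc
      = String.mk ((PySem.Set.ofList ma_byc.toList).flatMap (pvG jest.toList ma_byc.toList)) := by
  unfold brakuje_alt
  rw [pvGo_eq]

-- ===== VERDICT (by name: the statement is the Claim_ definition above) =====
theorem brakuje_spec : Claim_equal_brakuje := by
  intro jest ma_byc _
  unfold Spec_brakuje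
  rw [pvA_eq, pvB_eq]
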